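-- pv_equiv track=rewrite | github.com/Ramsi-K/LeetCode-solutions | 2523-closest-prime-numbers-in-range/2523-closest-prime-numbers-in-range.py | closestPrimes
-- ===== SOURCE A (Python) =====
-- from typing import List
--
-- def closestPrimes(left: int, right: int) -> List[int]:
--     if right < 2:
--         return [-1, -1]
--
--     # Miller-Rabin primality test
--     def is_prime(n: int) -> bool:
--         if n < 2:
--             return False
--         for p in [2, 3, 5, 7, 11, 13, 17, 19, 23, 29, 31, 37]:
--             if n % p == 0:
--                 return n == p
--         d = n - 1
--         s = 0
--         while d % 2 == 0:
--             d //= 2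
--             s += 1
--         for a in [2, 3, 5, 7, 11, 13, 17, 19, 23, 29, 31, 37]:
--             if a >= n:
--                 continue
--             x = pow(a, d, n)
--             if x == 1 or x == n - 1:
--                 continue
--             for _ in range(s - 1):
--                 x = pow(x, 2, n)
--                 if x == n - 1:
--                     break
--             else:
--                 return False
--         return True
--
--     # Handle the case where left <= 2
--     if left <= 2:
--         if right >= 3 and is_prime(3):
--             return [2, 3]
--         else:
--             return [-1, -1]
--
--     # Start from the first odd number >= left
--     if left % 2 == 0:
--         left += 1
--
--     prev_prime = -1
--     min_diff = float('inf')
--     res = [-1, -1]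
--
--     for num in range(left, right + 1, 2):
--         if is_prime(num):
--             if prev_prime != -1:
--                 diff = num - prev_prime
--                 if diff < min_diff:
--                     min_diff = diff
--                     res = [prev_prime, num]
--             prev_prime = num
--
--     return res
-- ===== SOURCE B (Python) =====
-- from typing import List
--
-- _SMALL = [2, 3, 5, 7, 11, 13, 17, 19, 23, 29, 31, 37]
--
--
-- def _is_prime(n: int) -> bool:
--     # deterministic Miller-Rabin (bases 2..37), trial prefix expressed via any/all
--     if n < 2:
--         return False
--     if any(n % p == 0 for p in _SMALL):
--         return n in _SMALL
--     d, s = n - 1, 0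
--     while d % 2 == 0:
--         d //= 2
--         s += 1
--
--     def strong(a: int) -> bool:
--         x = pow(a, d, n)
--         if x == 1 or x == n - 1:
--             return True
--         for _ in range(s - 1):
--             x = x * x % n
--             if x == n - 1:
--                 return True
--         return False
--
--     return all(strong(a) for a in _SMALL if a < n)
--
--
-- def closestPrimes(left: int, right: int) -> List[int]:
--     # Iterative deepening on the gap g: the answer is the first pair of primes
--     # p, p+g (smallest g, then smallest p) with both in range.  Any two primes at
--     # distance g enclose an adjacent pair of gap <= g, so the first hit is exactly
--     # the first minimal adjacent pair the linear scan would report.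
--     lo = max(left, 2)
--     for g in range(1, right - lo + 1):
--         for p in range(lo, right - g + 1):
--             if _is_prime(p) and _is_prime(p + g):
--                 return [p, p + g]
--     return [-1, -1]
-- ===== Notes on version B (the rewrite author's own statement) =====
-- stated objective: alternative
-- what changed: B abandons A's single left-to-right scan with mutable prev-prime/min-diff/result state (and its left<=2 and even-start special cases) for iterative deepening on the gap: for g = 1, 2, ... it searches the range for the first p with p and p+g both prime and returns [p, p+g]; correctness rests on the fact that two primes at distance g enclose an adjacent prime pair of gap <= g, so the first hit (smallest g, then smallest p) is exactly the first minimal adjacent pair.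
import Mathlib
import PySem

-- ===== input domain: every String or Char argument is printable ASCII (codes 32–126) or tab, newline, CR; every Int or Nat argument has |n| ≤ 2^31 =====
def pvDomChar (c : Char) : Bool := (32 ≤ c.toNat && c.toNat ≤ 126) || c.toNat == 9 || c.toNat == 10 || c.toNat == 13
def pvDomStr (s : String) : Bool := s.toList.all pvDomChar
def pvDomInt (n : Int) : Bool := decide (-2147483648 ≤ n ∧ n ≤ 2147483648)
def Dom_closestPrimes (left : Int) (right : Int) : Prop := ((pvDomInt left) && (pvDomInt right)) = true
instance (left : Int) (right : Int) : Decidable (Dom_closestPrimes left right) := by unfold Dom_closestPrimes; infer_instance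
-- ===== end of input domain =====

-- B replaces A's single scan with mutable prev/min-diff state by iterative deepening on the gap g:
-- the first p (smallest g, then smallest p) with p and p+g both prime is returned; two primes at
-- distance g enclose an adjacent prime pair of gap <= g, so this is A's first minimal adjacent pair.
-- Objective: alternative algorithm (no speed claim).


-- ===== PORT A =====

-- the base list [2, 3, 5, 7, 11, 13, 17, 19, 23, 29, 31, 37] (same literal in Source A and Source B)
def pvSmall : List Int := [2, 3, 5, 7, 11, 13, 17, 19, 23, 29, 31, 37]

-- A's trial loop: 'for p in [...]: if n % p == 0: return n == p' — first divisor decides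
def pvTrialA (n : Int) : List Int → Option Bool
  | [] => none
  | p :: ps => if PySem.Int.mod n p == 0 then some (n == p) else pvTrialA n ps

-- 'd = n - 1; s = 0; while d % 2 == 0: d //= 2; s += 1' — identical lines in Source A and Source B, shared
-- helper; the '0 < d' conjunct is a totality guard only (d ≥ 1 at every reachable call)
def pvSplit2 (d : Int) (s : Nat) : Int × Nat :=
  if h : 0 < d ∧ PySem.Int.mod d 2 = 0 then pvSplit2 (PySem.Int.floordiv d 2) (s + 1) else (d, s)
termination_by d.toNat
decreasing_by
  rw [PySem.Int.floordiv_eq_ediv_of_pos (by omega : (0:Int) < 2)]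
  omega

-- A's inner 'for _ in range(s - 1): x = pow(x, 2, n); if x == n - 1: break' — true iff it broke
def pvInnerA (n : Int) : Int → Nat → Bool
  | _, 0 => false
  | x, Nat.succ k =>
    let x' := PySem.Int.powMod x 2 n
    if x' == n - 1 then true else pvInnerA n x' k

-- A's witness loop; 'false' = the for-else 'return False' fired
def pvBasesA (n d : Int) (s : Nat) : List Int → Bool
  | [] => true
  | a :: rest =>
    if a ≥ n then pvBasesA n d s rest
    else
      let x := PySem.Int.powMod a d.toNat n  -- pow(a, d, n); d ≥ 0 at every reachable call
      if x == 1 || x == n - 1 then pvBasesA n d s rest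
      else if pvInnerA n x (s - 1) then pvBasesA n d s rest
      else false

def pvIsPrimeA (n : Int) : Bool :=
  if n < 2 then false
  else
    match pvTrialA n pvSmall with
    | some b => b
    | none =>
      let ds := pvSplit2 (n - 1) 0
      pvBasesA n ds.1 ds.2 pvSmall

-- body of A's scan for a prime num; min_diff = float('inf') is ported as Option Int, none = +inf
-- (it is only ever compared against, never returned)
def pvCoreA (st : Int × Option Int × List Int) (num : Int) : Int × Option Int × List Int :=
  match st with
  | (prev, minDiff, res) =>
    if prev != -1 then
      let diff := num - prev
      if (match minDiff with | none => true | some m => decide (diff < m)) then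
        (num, some diff, [prev, num])
      else (num, minDiff, res)
    else (num, minDiff, res)

def pvStepA (st : Int × Option Int × List Int) (num : Int) : Int × Option Int × List Int :=
  if pvIsPrimeA num then pvCoreA st num else st

def closestPrimes (left : Int) (right : Int) : List Int :=
  if right < 2 then [-1, -1]
  else if left ≤ 2 then
    if 3 ≤ right && pvIsPrimeA 3 then [2, 3] else [-1, -1]
  else
    let left' := if PySem.Int.mod left 2 == 0 then left + 1 else left
    ((PySem.List.pyRange left' (right + 1) 2).foldl pvStepA (-1, none, [-1, -1])).2.2

-- ===== PORT B =====

-- B's 'for _ in range(s - 1): x = x * x % n; if x == n - 1: return True'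
def pvSquaresB (n : Int) : Int → Nat → Bool
  | _, 0 => false
  | x, Nat.succ k =>
    let x' := PySem.Int.mod (x * x) n
    if x' == n - 1 then true else pvSquaresB n x' k

def pvStrongB (n d : Int) (s : Nat) (a : Int) : Bool :=
  let x := PySem.Int.powMod a d.toNat n  -- pow(a, d, n); d ≥ 0 at every reachable call
  if x == 1 || x == n - 1 then true
  else pvSquaresB n x (s - 1)

def pvIsPrimeB (n : Int) : Bool :=
  if n < 2 then false
  else if pvSmall.any (fun p => PySem.Int.mod n p == 0) then pvSmall.contains n
  else
    let ds := pvSplit2 (n - 1) 0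
    (pvSmall.filter (fun a => a < n)).all (pvStrongB n ds.1 ds.2)

-- B's inner loop 'for p in range(lo, right - g + 1): if _is_prime(p) and _is_prime(p + g):
-- return [p, p + g]' — Python's range is lazy, so the loop is recursion on the counter p
def pvScanP (g p stop : Int) : Option (List Int) :=
  if h : p < stop then
    if pvIsPrimeB p && pvIsPrimeB (p + g) then some [p, p + g] else pvScanP g (p + 1) stop
  else none
termination_by (stop - p).toNat
decreasing_by omega

-- B's outer loop 'for g in range(1, right - lo + 1)'; a hit returns at once, exhaustion [-1, -1]
def pvScanG (lo right g gstop : Int) : List Int :=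
  if h : g < gstop then
    match pvScanP g lo (right - g + 1) with
    | some res => res
    | none => pvScanG lo right (g + 1) gstop
  else [-1, -1]
termination_by (gstop - g).toNat
decreasing_by omega

def closestPrimes_alt (left : Int) (right : Int) : List Int :=
  let lo := max left 2
  pvScanG lo right 1 (right - lo + 1)

-- ===== PRECONDITION & SPEC =====
def Spec_closestPrimes (left : Int) (right : Int) (out : List Int) : Prop := out = closestPrimes_alt left right
instance (left : Int) (right : Int) (out : List Int) : Decidable (Spec_closestPrimes left right out) := by unfold Spec_closestPrimes; infer_instance

-- ===== CLAIM (what is proved, stated in full; the proofs are below) =====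
def Claim_equal_closestPrimes : Prop := ∀ (left : Int) (right : Int), Dom_closestPrimes left right → Spec_closestPrimes left right (closestPrimes left right)

-- ===== LEMMAS AND PROOFS =====

-- proof-side reference implementation: A's state machine reformulated as a fold of a first-strict-min
-- step over the adjacent pairs of the prime list (the intermediate form both programs are reduced to)
def pvStepB (st : Int × Int) (pq : Int × Int) : Int × Int :=
  if st.2 == -1 || pq.2 - pq.1 < st.2 - st.1 then (pq.1, pq.2) else st

def pvOldAlt (left : Int) (right : Int) : List Int :=
  let primes := (PySem.List.pyRange (max left 2) (right + 1) 1).filter pvIsPrimeA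
  let bb := (primes.zip (primes.drop 1)).foldl pvStepB (-1, -1)
  [bb.1, bb.2]

-- Python mod with positive divisor 2 is emod
lemma pvMod2 (a : Int) : PySem.Int.mod a 2 = a % 2 :=
  PySem.Int.mod_eq_emod_of_pos (by norm_num : (0:Int) < 2)

-- distinct members of pvSmall never divide one another
lemma pvSmall_dvd (p q : Int) (hp : p ∈ pvSmall) (hq : q ∈ pvSmall) (h : p ∣ q) : p = q := by
  fin_cases hp <;> fin_cases hq <;> first | rfl | (exfalso; omega) | (exfalso; exact absurd h (by decide))

-- if some small prime divides n then n is itself in pvSmall iff n is that prime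
lemma pvContains_of_dvd (n p : Int) (hp : p ∈ pvSmall) (hd : PySem.Int.mod n p = 0) :
    pvSmall.contains n = (n == p) := by
  rw [PySem.Int.mod_eq_zero_iff_dvd] at hd
  by_cases hmem : n ∈ pvSmall
  · have := pvSmall_dvd p n hp hmem hd
    subst this
    simp [hmem]
  · have : n ≠ p := fun h => hmem (h ▸ hp)
    simp [hmem, this]

lemma pvTrialA_none_iff (n : Int) : ∀ l : List Int, pvTrialA n l = none ↔ ∀ p ∈ l, ¬ (PySem.Int.mod n p = 0)
  | [] => by simp [pvTrialA]
  | p :: ps => by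
    by_cases h : PySem.Int.mod n p = 0 <;>
      simp [pvTrialA, h, pvTrialA_none_iff n ps]

lemma pvTrialA_some (n : Int) : ∀ (l : List Int) (b : Bool), pvTrialA n l = some b →
    ∃ p ∈ l, PySem.Int.mod n p = 0 ∧ b = (n == p)
  | [], b => by simp [pvTrialA]
  | p :: ps, b => by
    by_cases h : PySem.Int.mod n p = 0
    · intro hb
      simp [pvTrialA, h] at hb
      exact ⟨p, by simp, h, hb.symm⟩
    · intro hb
      simp [pvTrialA, h] at hb
      obtain ⟨q, hq, hq0, hbq⟩ := pvTrialA_some n ps b hb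
      exact ⟨q, by simp [hq], hq0, hbq⟩

lemma pvInner_eq (n : Int) : ∀ (k : Nat) (x : Int), pvInnerA n x k = pvSquaresB n x k
  | 0, x => rfl
  | Nat.succ k, x => by
    have hpow : PySem.Int.powMod x 2 n = PySem.Int.mod (x * x) n := by
      rw [PySem.Int.powMod_eq, pow_two]
    simp only [pvInnerA, pvSquaresB, hpow]
    by_cases h : PySem.Int.mod (x * x) n == n - 1 <;> simp [h, pvInner_eq n k]

lemma pvStrong_char (n d : Int) (s : Nat) (a : Int) :
    pvStrongB n d s a =
      ((PySem.Int.powMod a d.toNat n == 1 || PySem.Int.powMod a d.toNat n == n - 1) ||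
        pvSquaresB n (PySem.Int.powMod a d.toNat n) (s - 1)) := by
  simp only [pvStrongB]
  by_cases h1 : (PySem.Int.powMod a d.toNat n == 1 || PySem.Int.powMod a d.toNat n == n - 1) = true <;>
    simp [h1]

lemma pvBases_eq (n d : Int) (s : Nat) : ∀ l : List Int,
    pvBasesA n d s l = (l.filter (fun a => a < n)).all (pvStrongB n d s)
  | [] => rfl
  | a :: l => by
    by_cases ha : a ≥ n
    · have hlt : ¬ (a < n) := by omega
      simp [pvBasesA, ha, hlt, pvBases_eq n d s l]
    · have hlt : a < n := by omega
      have hA : pvBasesA n d s (a :: l) = (pvStrongB n d s a && pvBasesA n d s l) := by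
        rw [pvStrong_char, ← pvInner_eq]
        simp only [pvBasesA, if_neg ha]
        by_cases h1 : (PySem.Int.powMod a d.toNat n == 1 || PySem.Int.powMod a d.toNat n == n - 1) = true
        · simp [h1]
        · rw [Bool.not_eq_true] at h1
          by_cases hs : pvInnerA n (PySem.Int.powMod a d.toNat n) (s - 1) = true <;> simp [h1, hs]
      rw [hA, pvBases_eq n d s l, List.filter_cons]
      simp [hlt]

-- the two Miller-Rabin tests agree on every integer
lemma pvIsPrime_eq (n : Int) : pvIsPrimeB n = pvIsPrimeA n := by
  by_cases hn : n < 2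
  · simp [pvIsPrimeA, pvIsPrimeB, hn]
  · simp only [pvIsPrimeA, pvIsPrimeB, if_neg hn]
    cases htr : pvTrialA n pvSmall with
    | none =>
      have hall := (pvTrialA_none_iff n pvSmall).1 htr
      have hany : pvSmall.any (fun p => PySem.Int.mod n p == 0) = false := by
        simp only [List.any_eq_false]
        intro p hp
        simpa using hall p hp
      simp [hany, pvBases_eq]
    | some b =>
      obtain ⟨p, hp, hp0, hb⟩ := pvTrialA_some n pvSmall b htr
      have hany : pvSmall.any (fun p => PySem.Int.mod n p == 0) = true := by
        simp only [List.any_eq_true]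
        exact ⟨p, hp, by simpa using hp0⟩
      simp only [hany, hb]
      exact pvContains_of_dvd n p hp hp0

-- an even number other than 2 never passes A's test (its trial loop sees 2 first)
lemma pvIsPrimeA_even (n : Int) (h2 : PySem.Int.mod n 2 = 0) (hne : n ≠ 2) : pvIsPrimeA n = false := by
  have hdvd : (2:Int) ∣ n := (PySem.Int.mod_eq_zero_iff_dvd n 2).mp h2
  by_cases hn : n < 2
  · simp [pvIsPrimeA, hn]
  · simp [pvIsPrimeA, hn, pvSmall, pvTrialA, hdvd, hne]

-- anything A's test accepts is at least 2
lemma pvIsPrimeA_ge2 (n : Int) (h : pvIsPrimeA n = true) : 2 ≤ n := by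
  by_contra hn
  simp [pvIsPrimeA, show n < 2 by omega] at h

-- step-2 range: the two induction forms
lemma pvRange2_nil {a b : Int} (h : b ≤ a) : PySem.List.pyRange a b 2 = [] := by
  rw [PySem.List.pyRange_of_pos a b (by norm_num)]
  simp [show ¬ a < b by omega]

lemma pvRange2_cons {a b : Int} (h : a < b) : PySem.List.pyRange a b 2 = a :: PySem.List.pyRange (a + 2) b 2 := by
  rw [PySem.List.pyRange_of_pos a b (by norm_num), PySem.List.pyRange_of_pos (a + 2) b (by norm_num)]
  have hn : ((b - a + 2 - 1) / 2).toNat =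
      (if a + 2 < b then ((b - (a + 2) + 2 - 1) / 2).toNat else 0) + 1 := by
    split <;> omega
  rw [if_pos h, hn, List.range_succ_eq_map]
  simp only [List.map_cons, List.map_map, Nat.cast_zero, mul_zero, add_zero]
  congr 1
  apply List.map_congr_left
  intro k _
  simp only [Function.comp_apply]
  push_cast
  ring

-- filtering A's primality over step 1 or step 2 from an odd start ≥ 3 gives the same list
lemma pvFilter_parity : ∀ (fuel : Nat) (a b : Int), (b - a).toNat ≤ fuel → 3 ≤ a →
    PySem.Int.mod a 2 = 1 →
    (PySem.List.pyRange a b 1).filter pvIsPrimeA = (PySem.List.pyRange a b 2).filter pvIsPrimeA := by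
  intro fuel
  induction fuel with
  | zero =>
    intro a b hf _ _
    rw [PySem.List.pyRange_one_eq_nil (by omega), pvRange2_nil (by omega)]
  | succ k ih =>
    intro a b hf ha hodd
    by_cases hab : a < b
    · rw [PySem.List.pyRange_one_cons hab, pvRange2_cons hab]
      by_cases hab1 : a + 1 < b
      · have heven : pvIsPrimeA (a + 1) = false := by
          apply pvIsPrimeA_even
          · rw [PySem.Int.mod_eq_emod_of_pos (by norm_num)] at hodd ⊢
            omega
          · omega
        have hoddnext : PySem.Int.mod (a + 2) 2 = 1 := by
          rw [PySem.Int.mod_eq_emod_of_pos (by norm_num)] at hodd ⊢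
          omega
        have hih := ih (a + 2) b (by omega) (by omega) hoddnext
        rw [PySem.List.pyRange_one_cons hab1]
        rw [List.filter_cons, List.filter_cons, List.filter_cons]
        simp only [heven, Bool.false_eq_true, if_false]
        rw [show a + 1 + 1 = a + 2 from by ring, hih]
      · rw [PySem.List.pyRange_one_eq_nil (by omega : b ≤ a + 1), pvRange2_nil (by omega : b ≤ a + 2)]
    · rw [PySem.List.pyRange_one_eq_nil (by omega), pvRange2_nil (by omega)]

-- pairs zipped from a strictly increasing list are increasing
lemma pvZip_lt : ∀ l : List Int, l.Pairwise (· < ·) →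
    ∀ pq ∈ l.zip (l.drop 1), pq.1 < pq.2
  | [], _, pq, h => by simp at h
  | [x], _, pq, h => by simp at h
  | x :: y :: l, hp, pq, h => by
    simp only [List.drop_one, List.tail_cons, List.zip_cons_cons] at h
    rcases List.mem_cons.mp h with h' | h'
    · subst h'
      exact (List.pairwise_cons.1 hp).1 y (by simp)
    · exact pvZip_lt (y :: l) ((List.pairwise_cons.1 hp).2) pq (by simpa using h')

-- once the best pair has gap ≤ 1, increasing pairs never replace it
lemma pvStay : ∀ (pairs : List (Int × Int)) (bp bq : Int), bq ≠ -1 → bq - bp ≤ 1 →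
    (∀ pq ∈ pairs, pq.1 < pq.2) → pairs.foldl pvStepB (bp, bq) = (bp, bq)
  | [], bp, bq, _, _, _ => rfl
  | pq :: pairs, bp, bq, hbq, hgap, hlt => by
    have h1 : pq.1 < pq.2 := hlt pq (by simp)
    have hno : ¬ (pq.2 - pq.1 < bq - bp) := by omega
    rw [List.foldl_cons]
    have hstep : pvStepB (bp, bq) pq = (bp, bq) := by
      simp [pvStepB, hbq, hno]
    rw [hstep]
    exact pvStay pairs bp bq hbq hgap (fun x hx => hlt x (by simp [hx]))

-- A's fold over the prime list equals the reference fold over adjacent pairs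
lemma pvFold_pair : ∀ (ps : List Int) (prev : Int) (md : Option Int) (res : List Int) (bp bq : Int),
    prev ≠ -1 → (∀ x ∈ ps, x ≠ -1) →
    ((md = none ∧ res = [-1, -1] ∧ bp = -1 ∧ bq = -1) ∨
      (md = some (bq - bp) ∧ res = [bp, bq] ∧ bq ≠ -1)) →
    (ps.foldl pvCoreA (prev, md, res)).2.2 =
      (let bb := (((prev :: ps).zip ps).foldl pvStepB (bp, bq)); [bb.1, bb.2])
  | [], prev, md, res, bp, bq, _, _, hrel => by
    rcases hrel with ⟨_, hres, hbp, hbq⟩ | ⟨_, hres, _⟩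
    · simp [hres, hbp, hbq]
    · simp [hres]
  | q :: rest, prev, md, res, bp, bq, hprev, hmem, hrel => by
    have hq : q ≠ -1 := hmem q (by simp)
    have hmem' : ∀ x ∈ rest, x ≠ -1 := fun x hx => hmem x (by simp [hx])
    simp only [List.zip_cons_cons, List.foldl_cons]
    rcases hrel with ⟨hmd, hres, hbp, hbq⟩ | ⟨hmd, hres, hbq⟩
    · subst hmd hres hbp hbq
      have hA : pvCoreA (prev, none, [-1, -1]) q = (q, some (q - prev), [prev, q]) := by
        simp [pvCoreA, hprev]
      have hB : pvStepB (-1, -1) (prev, q) = (prev, q) := by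
        simp [pvStepB]
      rw [hA, hB]
      exact pvFold_pair rest q (some (q - prev)) [prev, q] prev q hq hmem'
        (Or.inr ⟨rfl, rfl, hq⟩)
    · subst hmd hres
      by_cases hlt : q - prev < bq - bp
      · have hA : pvCoreA (prev, some (bq - bp), [bp, bq]) q = (q, some (q - prev), [prev, q]) := by
          simp [pvCoreA, hprev, hlt]
        have hB : pvStepB (bp, bq) (prev, q) = (prev, q) := by
          simp [pvStepB, hlt]
        rw [hA, hB]
        exact pvFold_pair rest q (some (q - prev)) [prev, q] prev q hq hmem'
          (Or.inr ⟨rfl, rfl, hq⟩)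
      · have hA : pvCoreA (prev, some (bq - bp), [bp, bq]) q = (q, some (bq - bp), [bp, bq]) := by
          simp [pvCoreA, hprev, hlt]
        have hB : pvStepB (bp, bq) (prev, q) = (bp, bq) := by
          have hc : (bq == -1 || decide (q - prev < bq - bp)) = false := by
            simp [hbq, hlt]
          simp [pvStepB, hc]
        rw [hA, hB]
        exact pvFold_pair rest q (some (bq - bp)) [bp, bq] bp bq hq hmem'
          (Or.inr ⟨rfl, rfl, hbq⟩)

-- the left ≥ 3 branch of A against the reference fold
lemma pvMain_big (left right : Int) (hl : 3 ≤ left) :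
    ((PySem.List.pyRange (if PySem.Int.mod left 2 == 0 then left + 1 else left) (right + 1) 2).foldl
        pvStepA (-1, none, [-1, -1])).2.2 =
      (let primes := (PySem.List.pyRange left (right + 1) 1).filter pvIsPrimeA
       let bb := (primes.zip (primes.drop 1)).foldl pvStepB (-1, -1)
       ([bb.1, bb.2] : List Int)) := by
  set L := if PySem.Int.mod left 2 == 0 then left + 1 else left with hLdef
  have hL3 : 3 ≤ L := by rw [hLdef]; split <;> omega
  have hLodd : PySem.Int.mod L 2 = 1 := by
    rw [hLdef]
    by_cases he : PySem.Int.mod left 2 = 0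
    · rw [if_pos (by rw [he]; rfl : (PySem.Int.mod left 2 == 0) = true)]
      rw [pvMod2] at he ⊢
      omega
    · rw [if_neg (by intro hx; exact he (eq_of_beq hx))]
      rw [pvMod2] at he ⊢
      omega
  have hfilter1 : (PySem.List.pyRange left (right + 1) 1).filter pvIsPrimeA
      = (PySem.List.pyRange L (right + 1) 1).filter pvIsPrimeA := by
    by_cases he : PySem.Int.mod left 2 = 0
    · have hLe : L = left + 1 := by
        rw [hLdef, if_pos (by rw [he]; rfl : (PySem.Int.mod left 2 == 0) = true)]
      rw [hLe]
      by_cases hlt : left < right + 1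
      · rw [PySem.List.pyRange_one_cons hlt, List.filter_cons]
        simp [pvIsPrimeA_even left he (by omega)]
      · rw [PySem.List.pyRange_one_eq_nil (by omega), PySem.List.pyRange_one_eq_nil (by omega)]
    · rw [show L = left from by rw [hLdef, if_neg (by intro hx; exact he (eq_of_beq hx))]]
  have hfilter2 := pvFilter_parity (right + 1 - L).toNat L (right + 1) le_rfl hL3 hLodd
  have hAfold : (PySem.List.pyRange L (right + 1) 2).foldl pvStepA ((-1 : Int), (none : Option Int), ([-1, -1] : List Int))
      = ((PySem.List.pyRange L (right + 1) 2).filter pvIsPrimeA).foldl pvCoreA (-1, none, [-1, -1]) := by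
    rw [List.foldl_filter]
    rfl
  rw [hAfold]
  rw [hfilter1, hfilter2]
  set P := (PySem.List.pyRange L (right + 1) 2).filter pvIsPrimeA with hP
  have hPmem : ∀ x ∈ P, (2:Int) ≤ x := by
    intro x hx
    exact pvIsPrimeA_ge2 x (List.mem_filter.mp hx).2
  cases hPc : P with
  | nil =>
    simp
  | cons p ps =>
    rw [hPc] at hPmem
    rw [List.foldl_cons]
    have hcore : pvCoreA (-1, none, [-1, -1]) p = (p, none, [-1, -1]) := by
      simp [pvCoreA]
    rw [hcore]
    have hp2 : p ≠ -1 := by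
      have := hPmem p (by simp)
      omega
    have hps : ∀ x ∈ ps, x ≠ -1 := by
      intro x hx
      have := hPmem x (by simp [hx])
      omega
    have hfp := pvFold_pair ps p none [-1, -1] (-1) (-1) hp2 hps (Or.inl ⟨rfl, rfl, rfl, rfl⟩)
    simp only [List.drop_one, List.tail_cons]
    exact hfp

-- A equals the reference fold
lemma pvMainOld (left right : Int) : closestPrimes left right = pvOldAlt left right := by
  unfold pvOldAlt
  unfold closestPrimes
  by_cases h2 : right < 2
  · rw [if_pos h2]
    rw [PySem.List.pyRange_one_eq_nil (le_trans (by omega : right + 1 ≤ 2) (le_max_right left 2))]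
    simp
  · rw [if_neg h2]
    by_cases hl : left ≤ 2
    · rw [if_pos hl]
      rw [max_eq_right (by omega : left ≤ 2)]
      by_cases h3 : 3 ≤ right
      · have hP3 : pvIsPrimeA 3 = true := by decide
        rw [if_pos (by simp [h3, hP3] : (decide (3 ≤ right) && pvIsPrimeA 3) = true)]
        have e1 : PySem.List.pyRange 2 (right + 1) 1 = 2 :: PySem.List.pyRange 3 (right + 1) 1 := by
          have h := PySem.List.pyRange_one_cons (by omega : (2:Int) < right + 1)
          norm_num at h
          exact h
        have e2 : PySem.List.pyRange 3 (right + 1) 1 = 3 :: PySem.List.pyRange 4 (right + 1) 1 := by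
          have h := PySem.List.pyRange_one_cons (by omega : (3:Int) < right + 1)
          norm_num at h
          exact h
        rw [e1, e2]
        rw [List.filter_cons, List.filter_cons]
        simp only [show pvIsPrimeA 2 = true from by decide, hP3, eq_self_iff_true, if_true]
        simp only [List.drop_one, List.tail_cons, List.zip_cons_cons, List.foldl_cons]
        rw [show pvStepB (-1, -1) (2, 3) = (2, 3) from by simp [pvStepB]]
        have hrest_pw : (3 :: (PySem.List.pyRange 4 (right + 1) 1).filter pvIsPrimeA).Pairwise (· < ·) := by
          constructor
          · intro x hx
            have hx' := (List.mem_filter.mp hx).1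
            have := PySem.List.mem_pyRange_one.mp hx'
            omega
          · exact List.Pairwise.filter pvIsPrimeA (PySem.List.pairwise_lt_pyRange_one 4 (right + 1))
        have hzl := pvZip_lt (3 :: (PySem.List.pyRange 4 (right + 1) 1).filter pvIsPrimeA) hrest_pw
        simp only [List.drop_one, List.tail_cons] at hzl
        have hstay := pvStay
          ((3 :: (PySem.List.pyRange 4 (right + 1) 1).filter pvIsPrimeA).zip
            ((PySem.List.pyRange 4 (right + 1) 1).filter pvIsPrimeA))
          2 3 (by norm_num) (by norm_num) hzl
        rw [hstay]
      · have hr : right = 2 := by omega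
        subst hr
        decide
    · rw [if_neg hl]
      rw [max_eq_left (by omega : 2 ≤ left)]
      exact pvMain_big left right (by omega)

-- ===== bridging the reference fold to B's gap-deepening search =====

-- list-shaped forms of B's two loops (the loops walk exactly these pyRange lists)
def pvScanPL (g : Int) : List Int → Option (List Int)
  | [] => none
  | p :: ps =>
    if pvIsPrimeB p && pvIsPrimeB (p + g) then some [p, p + g] else pvScanPL g ps

def pvScanGL (lo right : Int) : List Int → List Int
  | [] => [-1, -1]
  | g :: gs =>
    match pvScanPL g (PySem.List.pyRange lo (right - g + 1) 1) with
    | some res => res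
    | none => pvScanGL lo right gs

lemma pvScanP_eq (g p stop : Int) : pvScanP g p stop = pvScanPL g (PySem.List.pyRange p stop 1) := by
  rw [pvScanP]
  by_cases h : p < stop
  · rw [PySem.List.pyRange_one_cons h, dif_pos h, pvScanPL, pvScanP_eq g (p + 1) stop]
  · rw [PySem.List.pyRange_one_eq_nil (by omega), dif_neg h, pvScanPL]
termination_by (stop - p).toNat
decreasing_by omega

lemma pvScanG_eq (lo right g gstop : Int) :
    pvScanG lo right g gstop = pvScanGL lo right (PySem.List.pyRange g gstop 1) := by
  rw [pvScanG]
  by_cases h : g < gstop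
  · rw [PySem.List.pyRange_one_cons h, dif_pos h, pvScanGL, pvScanP_eq, pvScanG_eq lo right (g + 1) gstop]
  · rw [PySem.List.pyRange_one_eq_nil (by omega), dif_neg h, pvScanGL]
termination_by (gstop - g).toNat
decreasing_by omega

-- scanP returns none when no position satisfies the (A-phrased) condition
lemma pvScanPL_none : ∀ (l : List Int) (g : Int),
    (∀ p ∈ l, (pvIsPrimeA p && pvIsPrimeA (p + g)) = false) → pvScanPL g l = none
  | [], g, _ => rfl
  | p :: ps, g, h => by
    have hp := h p (by simp)
    rw [pvScanPL, pvIsPrime_eq, pvIsPrime_eq, hp]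
    exact pvScanPL_none ps g (fun x hx => h x (by simp [hx]))

-- scanP finds the first position satisfying the condition
lemma pvScanPL_first : ∀ (l : List Int) (g a : Int), l.Pairwise (· < ·) → a ∈ l →
    (pvIsPrimeA a && pvIsPrimeA (a + g)) = true →
    (∀ x ∈ l, x < a → (pvIsPrimeA x && pvIsPrimeA (x + g)) = false) →
    pvScanPL g l = some [a, a + g]
  | [], g, a, _, ha, _, _ => by simp at ha
  | p :: ps, g, a, hpw, ha, hca, hfirst => by
    rw [pvScanPL, pvIsPrime_eq, pvIsPrime_eq]
    by_cases hc : (pvIsPrimeA p && pvIsPrimeA (p + g)) = true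
    · have hap : a = p := by
        rcases List.mem_cons.mp ha with h | h
        · exact h
        · have : p < a := (List.pairwise_cons.mp hpw).1 a h
          exact absurd hc (by simp [hfirst p (by simp) this])
      rw [hc, hap]
      simp
    · rw [Bool.not_eq_true] at hc
      rw [hc]
      simp only [Bool.false_eq_true, if_false]
      have hap : a ∈ ps := by
        rcases List.mem_cons.mp ha with h | h
        · exact absurd hca (by simp [h ▸ hc])
        · exact h
      exact pvScanPL_first ps g a (List.pairwise_cons.mp hpw).2 hap hca
        (fun x hx hxa => hfirst x (by simp [hx]) hxa)

-- scanG returns [-1,-1] when every gap fails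
lemma pvScanGL_none (lo right : Int) : ∀ gs : List Int,
    (∀ g ∈ gs, pvScanPL g (PySem.List.pyRange lo (right - g + 1) 1) = none) →
    pvScanGL lo right gs = [-1, -1]
  | [], _ => rfl
  | g :: gs, h => by
    rw [pvScanGL, h g (by simp)]
    exact pvScanGL_none lo right gs (fun x hx => h x (by simp [hx]))

-- scanG stops at the first gap m that succeeds, all smaller gaps failing
lemma pvScanGL_reach (lo right : Int) : ∀ (gs : List Int) (m : Int) (res : List Int),
    gs.Pairwise (· < ·) → m ∈ gs →
    (∀ g ∈ gs, g < m → pvScanPL g (PySem.List.pyRange lo (right - g + 1) 1) = none) →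
    pvScanPL m (PySem.List.pyRange lo (right - m + 1) 1) = some res →
    pvScanGL lo right gs = res
  | [], m, res, _, hm, _, _ => by simp at hm
  | g :: gs, m, res, hpw, hm, hnone, hsome => by
    rw [pvScanGL]
    rcases List.mem_cons.mp hm with h | h
    · subst h
      rw [hsome]
    · have hgm : g < m := (List.pairwise_cons.mp hpw).1 m h
      rw [hnone g (by simp) hgm]
      exact pvScanGL_reach lo right gs m res (List.pairwise_cons.mp hpw).2 h
        (fun x hx hxm => hnone x (by simp [hx]) hxm) hsome

-- members of a zip with the tail are members of the list
lemma pvZipMem (l : List Int) (x y : Int) (h : (x, y) ∈ l.zip (l.drop 1)) : x ∈ l ∧ y ∈ l := by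
  have := List.of_mem_zip h
  exact ⟨this.1, List.drop_subset 1 l this.2⟩

-- the zip of a sorted list with its tail is sorted on first components
lemma pvZipPW : ∀ l : List Int, l.Pairwise (· < ·) →
    (l.zip (l.drop 1)).Pairwise (fun u v : Int × Int => u.1 < v.1)
  | [], _ => by simp
  | [x], _ => by simp
  | x :: y :: l, hpw => by
    simp only [List.drop_one, List.tail_cons, List.zip_cons_cons]
    constructor
    · intro v hv
      have hv1 : v.1 ∈ y :: l := by
        obtain ⟨a, b, hab⟩ : ∃ a b, v = (a, b) := ⟨v.1, v.2, rfl⟩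
        subst hab
        exact (pvZipMem (y :: l) a b (by simpa using hv)).1
      exact (List.pairwise_cons.mp hpw).1 v.1 hv1
    · have := pvZipPW (y :: l) (List.pairwise_cons.mp hpw).2
      simpa using this

-- between two members of a sorted list lies an adjacent pair
lemma pvChain : ∀ (l : List Int), l.Pairwise (· < ·) → ∀ p q : Int, p ∈ l → q ∈ l → p < q →
    ∃ x y : Int, (x, y) ∈ l.zip (l.drop 1) ∧ p ≤ x ∧ x < y ∧ y ≤ q
  | [], _, p, q, hp, _, _ => by simp at hp
  | a :: rest, hpw, p, q, hp, hq, hpq => by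
    have hq_rest : q ∈ rest := by
      rcases List.mem_cons.mp hq with h | h
      · exfalso
        rcases List.mem_cons.mp hp with h' | h'
        · omega
        · have : a < p := (List.pairwise_cons.mp hpw).1 p h'
          omega
      · exact h
    rcases List.mem_cons.mp hp with h | h
    · -- p = a : take the head pair
      subst h
      obtain ⟨b, rest', hr⟩ : ∃ b rest', rest = b :: rest' := by
        cases rest with
        | nil => simp at hq_rest
        | cons b rest' => exact ⟨b, rest', rfl⟩
      subst hr
      refine ⟨p, b, ?_, le_refl p, (List.pairwise_cons.mp hpw).1 b (by simp), ?_⟩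
      · simp
      · rcases List.mem_cons.mp hq_rest with h | h
        · omega
        · exact le_of_lt ((List.pairwise_cons.mp (List.pairwise_cons.mp hpw).2).1 q h)
    · -- p in the tail : recurse
      obtain ⟨x, y, hxy, hpx, hxy2, hyq⟩ :=
        pvChain rest (List.pairwise_cons.mp hpw).2 p q h hq_rest hpq
      obtain ⟨b, rest', hr⟩ : ∃ b rest', rest = b :: rest' := by
        cases rest with
        | nil => simp at h
        | cons b rest' => exact ⟨b, rest', rfl⟩
      subst hr
      refine ⟨x, y, ?_, hpx, hxy2, hyq⟩
      simp only [List.drop_one, List.tail_cons, List.zip_cons_cons] at hxy ⊢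
      simp [hxy]

-- the fold keeps the first pair attaining the minimal gap
lemma pvFoldFirst : ∀ (zs : List (Int × Int)) (a b : Int), b ≠ -1 → a < b →
    (∀ pq ∈ zs, pq.1 < pq.2 ∧ pq.2 ≠ -1) →
    ∃ l₁ l₂, ((a, b) :: zs) = l₁ ++ (zs.foldl pvStepB (a, b)) :: l₂ ∧
      (∀ pq ∈ l₁, (zs.foldl pvStepB (a, b)).2 - (zs.foldl pvStepB (a, b)).1 < pq.2 - pq.1) ∧
      (∀ pq ∈ (a, b) :: zs, (zs.foldl pvStepB (a, b)).2 - (zs.foldl pvStepB (a, b)).1 ≤ pq.2 - pq.1)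
  | [], a, b, _, _, _ => by
    refine ⟨[], [], by simp, by simp, ?_⟩
    intro pq hpq
    simp at hpq
    simp [hpq]
  | pq :: rest, a, b, hb, hab, hgood => by
    have hpq := hgood pq (by simp)
    have hgood' : ∀ x ∈ rest, x.1 < x.2 ∧ x.2 ≠ -1 := fun x hx => hgood x (by simp [hx])
    by_cases hlt : pq.2 - pq.1 < b - a
    · have hstep : pvStepB (a, b) pq = pq := by
        simp [pvStepB, hlt]
      rw [List.foldl_cons, hstep]
      obtain ⟨l₁, l₂, hdec, hfirst, hmin⟩ := pvFoldFirst rest pq.1 pq.2 hpq.2 hpq.1 hgood'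
      have hppq : ((pq.1, pq.2) : Int × Int) = pq := rfl
      rw [hppq] at hdec hmin
      refine ⟨(a, b) :: l₁, l₂, by rw [List.cons_append, ← hdec], ?_, ?_⟩
      · intro x hx
        rcases List.mem_cons.mp hx with h | h
        · subst h
          have := hmin pq (by simp)
          simp only
          omega
        · exact hfirst x h
      · intro x hx
        rcases List.mem_cons.mp hx with h | h
        · subst h
          have := hmin pq (by simp)
          simp only
          omega
        · exact hmin x h
    · have hstep : pvStepB (a, b) pq = (a, b) := by
        have hc : ((b == -1) || decide (pq.2 - pq.1 < b - a)) = false := by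
          simp [hb, hlt]
        simp [pvStepB, hc]
      rw [List.foldl_cons, hstep]
      obtain ⟨l₁, l₂, hdec, hfirst, hmin⟩ := pvFoldFirst rest a b hb hab hgood'
      cases l₁ with
      | nil =>
        simp only [List.nil_append] at hdec
        injection hdec with h1 h2
        refine ⟨[], pq :: rest, ?_, by simp, ?_⟩
        · rw [← h1]
          simp
        · intro x hx
          rcases List.mem_cons.mp hx with h | h
          · subst h
            rw [← h1]
          · rcases List.mem_cons.mp h with h' | h'
            · subst h'
              rw [← h1]
              have hg : ((a, b) : Int × Int).2 - ((a, b) : Int × Int).1 = b - a := rfl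
              rw [hg]
              omega
            · exact hmin x (by simp [h'])
      | cons c l₁' =>
        have hinj : (a, b) = c ∧ rest = l₁' ++ rest.foldl pvStepB (a, b) :: l₂ := by
          simp only [List.cons_append, List.cons.injEq] at hdec
          exact ⟨hdec.1, hdec.2⟩
        refine ⟨(a, b) :: pq :: l₁', l₂, ?_, ?_, ?_⟩
        · simp only [List.cons_append, List.cons.injEq, true_and]
          exact hinj.2
        · intro x hx
          rcases List.mem_cons.mp hx with h | h
          · subst h
            have hab' := hfirst c (by simp)
            rw [← hinj.1] at hab'
            exact hab'
          · rcases List.mem_cons.mp h with h' | h'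
            · subst h'
              have hab' := hfirst c (by simp)
              rw [← hinj.1] at hab'
              simp only at hab'
              omega
            · exact hfirst x (by simp [h'])
        · intro x hx
          rcases List.mem_cons.mp hx with h | h
          · exact hmin x (by simp [h])
          · rcases List.mem_cons.mp h with h' | h'
            · subst h'
              have hab' := hfirst c (by simp)
              rw [← hinj.1] at hab'
              simp only at hab'
              omega
            · exact hmin x (by simp [h'])

-- the reference fold equals B
lemma pvBridge (left right : Int) : pvOldAlt left right = closestPrimes_alt left right := by
  simp only [pvOldAlt, closestPrimes_alt]
  rw [pvScanG_eq]
  set lo := max left 2 with hlo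
  set P := (PySem.List.pyRange lo (right + 1) 1).filter pvIsPrimeA with hPdef
  have hPmem : ∀ x : Int, x ∈ P ↔ (lo ≤ x ∧ x < right + 1 ∧ pvIsPrimeA x = true) := by
    intro x
    rw [hPdef, List.mem_filter, PySem.List.mem_pyRange_one]
    tauto
  have hPsort : P.Pairwise (· < ·) :=
    List.Pairwise.filter pvIsPrimeA (PySem.List.pairwise_lt_pyRange_one lo (right + 1))
  have hcond : ∀ g p : Int, 1 ≤ g → p ∈ PySem.List.pyRange lo (right - g + 1) 1 →
      (pvIsPrimeA p && pvIsPrimeA (p + g)) = true → p ∈ P ∧ p + g ∈ P := by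
    intro g p hg hp hc
    rw [PySem.List.mem_pyRange_one] at hp
    rw [Bool.and_eq_true] at hc
    exact ⟨(hPmem p).mpr ⟨hp.1, by omega, hc.1⟩, (hPmem (p + g)).mpr ⟨by omega, by omega, hc.2⟩⟩
  cases hPc : P with
  | nil =>
    rw [pvScanGL_none lo right _ ?_]
    · simp
    · intro g hg
      apply pvScanPL_none
      intro p hp
      by_contra hcf
      rw [Bool.not_eq_false] at hcf
      have hmem := (hcond g p ((PySem.List.mem_pyRange_one.mp hg).1) hp hcf).1
      rw [hPc] at hmem
      simp at hmem
  | cons p₀ P' =>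
    cases hPc' : P' with
    | nil =>
      rw [pvScanGL_none lo right _ ?_]
      · simp
      · intro g hg
        apply pvScanPL_none
        intro p hp
        by_contra hcf
        rw [Bool.not_eq_false] at hcf
        have hg1 : 1 ≤ g := (PySem.List.mem_pyRange_one.mp hg).1
        obtain ⟨h1, h2⟩ := hcond g p hg1 hp hcf
        rw [hPc, hPc'] at h1 h2
        simp at h1 h2
        omega
    | cons p₁ rest =>
      -- at least two primes: the fold picks the first minimal adjacent pair
      have hPc2 : P = p₀ :: p₁ :: rest := by rw [hPc, hPc']
      have hZeq : P.zip (P.drop 1) = (p₀, p₁) :: (p₁ :: rest).zip rest := by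
        rw [hPc2]
        simp [List.drop_one]
      have hgoodP : ∀ pq ∈ P.zip (P.drop 1), pq.1 < pq.2 ∧ pq.2 ≠ -1 := by
        intro pq hpq
        have hlt := pvZip_lt P hPsort pq hpq
        obtain ⟨a, b, hab⟩ : ∃ a b, pq = (a, b) := ⟨pq.1, pq.2, rfl⟩
        subst hab
        have hmem := (pvZipMem P a b hpq).2
        have := ((hPmem b).mp hmem).2.2
        have := pvIsPrimeA_ge2 b this
        exact ⟨hlt, by simp only; omega⟩
      have hp01 : ((p₀, p₁) : Int × Int) ∈ P.zip (P.drop 1) := by rw [hZeq]; simp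
      have h01 := hgoodP (p₀, p₁) hp01
      obtain ⟨l₁, l₂, hdec, hfirst, hmin⟩ :=
        pvFoldFirst ((p₁ :: rest).zip rest) p₀ p₁ h01.2 h01.1
          (fun pq hpq => hgoodP pq (by rw [hZeq]; simp [hpq]))
      set r := ((p₁ :: rest).zip rest).foldl pvStepB (p₀, p₁) with hrdef
      have hdecP : P.zip (P.drop 1) = l₁ ++ r :: l₂ := by rw [hZeq, hdec]
      have hrZ : r ∈ P.zip (P.drop 1) := by
        rw [hdecP]
        exact List.mem_append_right l₁ (by simp)
      have hr12 := hgoodP r hrZ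
      have hr1P := (pvZipMem P r.1 r.2 hrZ).1
      have hr2P := (pvZipMem P r.1 r.2 hrZ).2
      have hr1 := (hPmem r.1).mp hr1P
      have hr2 := (hPmem r.2).mp hr2P
      have hminP : ∀ pq ∈ P.zip (P.drop 1), r.2 - r.1 ≤ pq.2 - pq.1 := by
        intro pq hpq
        rw [hZeq] at hpq
        exact hmin pq hpq
      -- the left-hand side is [r.1, r.2]
      have hfold : (P.zip (P.drop 1)).foldl pvStepB (-1, -1) = r := by
        rw [hZeq, List.foldl_cons, show pvStepB (-1, -1) (p₀, p₁) = (p₀, p₁) from by simp [pvStepB]]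
      rw [hPc2] at hfold
      rw [hfold]
      -- the right-hand side: gap-deepening reaches exactly m = r.2 - r.1
      have hscan : pvScanPL (r.2 - r.1) (PySem.List.pyRange lo (right - (r.2 - r.1) + 1) 1)
          = some [r.1, r.1 + (r.2 - r.1)] := by
        apply pvScanPL_first _ _ r.1 (PySem.List.pairwise_lt_pyRange_one _ _)
        · rw [PySem.List.mem_pyRange_one]
          constructor
          · exact hr1.1
          · omega
        · rw [show r.1 + (r.2 - r.1) = r.2 from by omega, Bool.and_eq_true]
          exact ⟨hr1.2.2, hr2.2.2⟩
        · intro x hx hxr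
          by_contra hcf
          rw [Bool.not_eq_false] at hcf
          obtain ⟨hxP, hxgP⟩ := hcond (r.2 - r.1) x (by omega) hx hcf
          obtain ⟨u, v, huv, hxu, huv2, hvx⟩ :=
            pvChain P hPsort x (x + (r.2 - r.1)) hxP hxgP (by omega)
          have hle := hminP (u, v) huv
          simp only at hle
          have hu : u = x := by omega
          -- the adjacent pair (u, v) lies strictly before r : contradicts firstness
          have hpwZ := pvZipPW P hPsort
          rw [hdecP] at hpwZ huv
          rcases List.mem_append.mp huv with hin | hin
          · have := hfirst (u, v) hin
            simp only at this
            omega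
          · rcases List.mem_cons.mp hin with heq | hin2
            · have hux : u = r.1 := by
                have := congrArg Prod.fst heq
                simpa using this
              omega
            · have hpr := (List.pairwise_append.mp hpwZ).2.1
              have hlt2 := (List.pairwise_cons.mp hpr).1 (u, v) hin2
              simp only at hlt2
              omega
      rw [pvScanGL_reach lo right _ (r.2 - r.1) [r.1, r.1 + (r.2 - r.1)]
        (PySem.List.pairwise_lt_pyRange_one _ _) ?_ ?_ hscan]
      · rw [show r.1 + (r.2 - r.1) = r.2 from by omega]
      · rw [PySem.List.mem_pyRange_one]
        constructor
        · omega
        · omega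
      · intro g hg hgm
        have hg1 : 1 ≤ g := (PySem.List.mem_pyRange_one.mp hg).1
        apply pvScanPL_none
        intro p hp
        by_contra hcf
        rw [Bool.not_eq_false] at hcf
        obtain ⟨hpP, hpgP⟩ := hcond g p hg1 hp hcf
        obtain ⟨u, v, huv, hpu, huv2, hvp⟩ := pvChain P hPsort p (p + g) hpP hpgP (by omega)
        have hle := hminP (u, v) huv
        simp only at hle
        omega

-- ===== VERDICT (by name: the statement is the Claim_ definition above) =====
theorem closestPrimes_spec : Claim_equal_closestPrimes := by
  intro left right _
  unfold Spec_closestPrimes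
  rw [pvMainOld, pvBridge]
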